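-- pv_equiv track=rewrite | github.com/skvcool-rgb/KOS-Organism | kos/grid_primitives.py | paint_objects_by_count
-- ===== SOURCE A (Python) =====
-- from typing import Any, Callable, Dict, List, Tuple
-- from collections import Counter
--
-- Grid = List[List[int]]
--
-- def color_counts(g: Grid) -> Counter:
--     return Counter(c for row in g for c in row)
--
-- def paint_objects_by_count(g: Grid) -> Grid:
--     """Color each connected component by its cell count (count -> color)."""
--     if not g or not g[0]: return g
--     bg = color_counts(g).most_common(1)[0][0]
--     rows, cols = len(g), len(g[0])
--     visited = [[False]*cols for _ in range(rows)]
--     components = []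
--
--     def bfs(si, sj):
--         q = [(si, sj)]
--         visited[si][sj] = True
--         cells = []
--         while q:
--             ci, cj = q.pop(0)
--             cells.append((ci, cj))
--             for di, dj in [(-1,0),(1,0),(0,-1),(0,1)]:
--                 ni, nj = ci+di, cj+dj
--                 if 0 <= ni < rows and 0 <= nj < cols and not visited[ni][nj] and g[ni][nj] != bg:
--                     visited[ni][nj] = True
--                     q.append((ni, nj))
--         return cells
--
--     for i in range(rows):
--         for j in range(cols):
--             if not visited[i][j] and g[i][j] != bg:
--                 cells = bfs(i, j)
--                 components.append(cells)
--
--     result = [[bg]*cols for _ in range(rows)]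
--     for comp in components:
--         c = min(len(comp), 9)  # Cap at 9 (max ARC color)
--         for ci, cj in comp:
--             result[ci][cj] = c
--     return result
-- ===== SOURCE B (Python) =====
-- from collections import Counter
--
-- def paint_objects_by_count(g):
--     """Color each connected component by its cell count (count -> color).
--
--     Alternative decomposition: instead of a shared visited matrix and a BFS
--     queue per component, compute for each non-background cell its connected
--     component as the least fixpoint of a set-saturation step, purely per cell.
--     """
--     if not g or not g[0]: return g
--     bg = Counter(c for row in g for c in row).most_common(1)[0][0]
--     rows, cols = len(g), len(g[0])
--
--     def grow(s):
--         return s | {(ni, nj)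
--                     for (ci, cj) in s
--                     for (ni, nj) in ((ci-1, cj), (ci+1, cj), (ci, cj-1), (ci, cj+1))
--                     if 0 <= ni < rows and 0 <= nj < cols and g[ni][nj] != bg}
--
--     def comp(i, j):
--         s = {(i, j)}
--         for _ in range(rows * cols):
--             t = grow(s)
--             if t == s:
--                 break
--             s = t
--         return s
--
--     return [[bg if g[i][j] == bg else min(len(comp(i, j)), 9)
--              for j in range(cols)]
--             for i in range(rows)]
-- ===== Notes on version B (the rewrite author's own statement) =====
-- stated objective: alternative
-- what changed: B drops A's shared visited matrix, BFS queue and component list: it recomputes bg the same way, then for each non-background cell independently computes its connected component as the least fixpoint of a set-saturation step (s -> s union in-bounds non-bg neighbours of s) and paints min(|component|,9) directly into a comprehension-built grid.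
import Mathlib
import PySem

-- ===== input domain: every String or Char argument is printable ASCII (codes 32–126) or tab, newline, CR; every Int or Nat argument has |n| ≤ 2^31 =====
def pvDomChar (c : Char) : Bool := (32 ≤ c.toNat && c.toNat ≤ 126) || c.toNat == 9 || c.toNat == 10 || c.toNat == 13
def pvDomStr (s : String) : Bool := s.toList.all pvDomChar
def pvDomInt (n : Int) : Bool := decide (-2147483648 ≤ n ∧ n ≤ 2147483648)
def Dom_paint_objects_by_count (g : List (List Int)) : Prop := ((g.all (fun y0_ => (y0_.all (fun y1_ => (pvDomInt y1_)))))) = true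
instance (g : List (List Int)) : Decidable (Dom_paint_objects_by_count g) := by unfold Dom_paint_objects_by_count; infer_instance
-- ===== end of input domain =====

-- B replaces A's shared visited matrix + per-component BFS queue by a pure per-cell
-- set-saturation fixpoint (same bg tie-breaking, same guard); objective: alternative
-- decomposition, not speed.

-- ===== PORT A =====
-- shared helper: bg = Counter(c for row in g for c in row).most_common(1)[0][0]
-- (identical line in both Pythons; most_common(1)[0] is the first key of maximal count,
--  keys in first-occurrence order — exactly PySem.List.max? over the counter's items.
--  The .getD (0,0) default is unreachable: both ports call it only on nonempty grids.)
def bgOf (g : List (List Int)) : Int :=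
  ((PySem.List.max? (PySem.Dict.counter (g.flatMap id)).items (fun kv => kv.2)).getD (0, 0)).1

-- grid access g[i][j]; every use in either port is guarded by 0 ≤ i < len(g), 0 ≤ j < cols,
-- and Pre_ (each row at least cols long) makes the getD defaults unreachable, so this is exact.
def gget (g : List (List Int)) (i j : Int) : Int := (g.getD i.toNat []).getD j.toNat 0

def vget (v : List (List Bool)) (i j : Int) : Bool := (v.getD i.toNat []).getD j.toNat false

def vset (v : List (List Bool)) (i j : Int) : List (List Bool) :=
  v.set i.toNat ((v.getD i.toNat []).set j.toNat true)

def rset (r : List (List Int)) (i j : Int) (c : Int) : List (List Int) :=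
  r.set i.toNat ((r.getD i.toNat []).set j.toNat c)

def pvDirs : List (Int × Int) := [(-1, 0), (1, 0), (0, -1), (0, 1)]

-- the body of A's `for di, dj in [...]` loop
def pvStep (g : List (List Int)) (bg : Int) (rows cols : Int) (c : Int × Int)
    (st : List (List Bool) × List (Int × Int)) (d : Int × Int) :
    List (List Bool) × List (Int × Int) :=
  let ni := c.1 + d.1
  let nj := c.2 + d.2
  if 0 ≤ ni ∧ ni < rows ∧ 0 ≤ nj ∧ nj < cols ∧ vget st.1 ni nj = false ∧ gget g ni nj ≠ bg
  then (vset st.1 ni nj, st.2 ++ [(ni, nj)])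
  else st

-- A's `while q:` loop; the fuel argument only makes the recursion structural
-- (it is always sufficient: each iteration strictly decreases |q| + 2·#unvisited).
def pvBfsGo (g : List (List Int)) (bg : Int) (rows cols : Int) :
    Nat → List (Int × Int) → List (List Bool) → List (Int × Int) →
    List (Int × Int) × List (List Bool)
  | 0, _, v, cells => (cells, v)
  | fuel + 1, q, v, cells =>
    match q with
    | [] => (cells, v)
    | c :: q' =>
      let st := pvDirs.foldl (pvStep g bg rows cols c) (v, q')
      pvBfsGo g bg rows cols fuel st.2 st.1 (cells ++ [c])

def pvBfs (g : List (List Int)) (bg : Int) (rows cols : Int) (rn cn : Nat)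
    (si sj : Int) (v : List (List Bool)) : List (Int × Int) × List (List Bool) :=
  pvBfsGo g bg rows cols (2 * (rn * cn) + 1) [(si, sj)] (vset v si sj) []

def paint_objects_by_count (g : List (List Int)) : List (List Int) :=
  if g = [] ∨ g.headD [] = [] then g
  else
    let bg := bgOf g
    let rn := g.length
    let cn := (g.headD []).length
    let rows : Int := rn
    let cols : Int := cn
    let init : List (List Bool) × List (List (Int × Int)) :=
      (List.replicate rn (List.replicate cn false), [])
    let scan :=
      (List.range rn).foldl (fun st (i : Nat) =>
        (List.range cn).foldl (fun (st : List (List Bool) × List (List (Int × Int))) (j : Nat) =>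
          if vget st.1 (i : Int) (j : Int) = false ∧ gget g (i : Int) (j : Int) ≠ bg then
            let r := pvBfs g bg rows cols rn cn (i : Int) (j : Int) st.1
            (r.2, st.2 ++ [r.1])
          else st) st) init
    scan.2.foldl (fun res comp =>
        let c : Int := min (comp.length : Int) 9
        comp.foldl (fun res p => rset res p.1 p.2 c) res)
      (List.replicate rn (List.replicate cn bg))

-- ===== PORT B =====
def pvNbrs (p : Int × Int) : List (Int × Int) :=
  [(p.1 - 1, p.2), (p.1 + 1, p.2), (p.1, p.2 - 1), (p.1, p.2 + 1)]

-- Source B's grow: s | {in-bounds non-bg neighbours of s}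
def pvGrow (g : List (List Int)) (bg : Int) (rows cols : Int)
    (s : PySem.Set (Int × Int)) : PySem.Set (Int × Int) :=
  PySem.Set.union s
    ((s.flatMap pvNbrs).filter (fun p =>
      decide (0 ≤ p.1 ∧ p.1 < rows ∧ 0 ≤ p.2 ∧ p.2 < cols) && (gget g p.1 p.2 != bg)))

-- Source B's comp: iterate grow at most rows*cols times, stopping at the fixpoint
def pvCompGo (g : List (List Int)) (bg : Int) (rows cols : Int) :
    Nat → PySem.Set (Int × Int) → PySem.Set (Int × Int)
  | 0, s => s
  | fuel + 1, s =>
    let t := pvGrow g bg rows cols s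
    if PySem.Set.equal t s then s else pvCompGo g bg rows cols fuel t

def paint_objects_by_count_alt (g : List (List Int)) : List (List Int) :=
  if g = [] ∨ g.headD [] = [] then g
  else
    let bg := bgOf g
    let rn := g.length
    let cn := (g.headD []).length
    (List.range rn).map (fun (i : Nat) =>
      (List.range cn).map (fun (j : Nat) =>
        if gget g (i : Int) (j : Int) = bg then bg
        else min ((pvCompGo g bg (rn : Int) (cn : Int) (rn * cn) [((i : Int), (j : Int))]).length : Int) 9))

-- ===== PRECONDITION & SPEC =====
-- Pre_ excludes exactly the grids with a row shorter than the first row (with that row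
-- nonempty): there Python A's scan `g[i][j]` for j in range(cols) raises IndexError
-- (and Python B raises likewise), so A never returns outside Pre_.
def Pre_paint_objects_by_count (g : List (List Int)) : Prop :=
  ∀ row ∈ g, (g.headD []).length ≤ row.length

instance (g : List (List Int)) : Decidable (Pre_paint_objects_by_count g) := by
  unfold Pre_paint_objects_by_count; infer_instance

def pvWitness_paint_objects_by_count : List (List Int) := [[1, 1], [2, 1]]

def Spec_paint_objects_by_count (g : List (List Int)) (out : List (List Int)) : Prop :=
  out = paint_objects_by_count_alt g

instance (g : List (List Int)) (out : List (List Int)) :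
    Decidable (Spec_paint_objects_by_count g out) := by
  unfold Spec_paint_objects_by_count; infer_instance

-- ===== CLAIM (what is proved, stated in full; the proofs are below) =====
def Claim_equal_paint_objects_by_count : Prop :=
  ∀ (g : List (List Int)), Dom_paint_objects_by_count g →
    Pre_paint_objects_by_count g →
    Spec_paint_objects_by_count g (paint_objects_by_count g)

-- ===== LEMMAS AND PROOFS =====

-- ---------- proof-layer definitions ----------

def okb (g : List (List Int)) (bg : Int) (rn cn : Nat) (p : Int × Int) : Bool :=
  decide (0 ≤ p.1 ∧ p.1 < (rn : Int) ∧ 0 ≤ p.2 ∧ p.2 < (cn : Int)) && (gget g p.1 p.2 != bg)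

def inbb (rn cn : Nat) (p : Int × Int) : Bool :=
  decide (0 ≤ p.1 ∧ p.1 < (rn : Int) ∧ 0 ≤ p.2 ∧ p.2 < (cn : Int))

def adjp (g : List (List Int)) (bg : Int) (rn cn : Nat) (p q : Int × Int) : Prop :=
  okb g bg rn cn p = true ∧ okb g bg rn cn q = true ∧
    (p.1 - q.1).natAbs + (p.2 - q.2).natAbs = 1

def Reach (g : List (List Int)) (bg : Int) (rn cn : Nat) : Int × Int → Int × Int → Prop :=
  Relation.ReflTransGen (adjp g bg rn cn)

def ShapeB (rn cn : Nat) (v : List (List Bool)) : Prop :=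
  v.length = rn ∧ ∀ row ∈ v, row.length = cn

def ShapeI (rn cn : Nat) (r : List (List Int)) : Prop :=
  r.length = rn ∧ ∀ row ∈ r, row.length = cn

def unm (v : List (List Bool)) : Nat := (v.map (fun row => row.count false)).sum

def rget (r : List (List Int)) (i j : Int) : Int := (r.getD i.toNat []).getD j.toNat 0

-- ---------- relation lemmas ----------

theorem adjp_symm (g : List (List Int)) (bg : Int) (rn cn : Nat) {p q : Int × Int}
    (h : adjp g bg rn cn p q) : adjp g bg rn cn q p := by
  obtain ⟨h1, h2, h3⟩ := h
  exact ⟨h2, h1, by omega⟩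

theorem reach_symm (g : List (List Int)) (bg : Int) (rn cn : Nat) {p q : Int × Int}
    (h : Reach g bg rn cn p q) : Reach g bg rn cn q p :=
  Relation.ReflTransGen.symmetric (fun _ _ hh => adjp_symm g bg rn cn hh) h

theorem inbb_of_okb (g : List (List Int)) (bg : Int) (rn cn : Nat) {p : Int × Int}
    (h : okb g bg rn cn p = true) : inbb rn cn p = true := by
  simp only [okb, Bool.and_eq_true] at h
  simpa [inbb] using h.1

theorem adjp_mem_nbrs (g : List (List Int)) (bg : Int) (rn cn : Nat) {p n : Int × Int}
    (h : adjp g bg rn cn p n) : n ∈ pvNbrs p := by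
  obtain ⟨_, _, h3⟩ := h
  obtain ⟨n1, n2⟩ := n
  obtain ⟨p1, p2⟩ := p
  simp only [pvNbrs, List.mem_cons, List.not_mem_nil, or_false, Prod.mk.injEq]
  simp only at h3
  omega

theorem nbrs_adjp (g : List (List Int)) (bg : Int) (rn cn : Nat) {p n : Int × Int}
    (hp : okb g bg rn cn p = true) (hn : okb g bg rn cn n = true)
    (h : n ∈ pvNbrs p) : adjp g bg rn cn p n := by
  refine ⟨hp, hn, ?_⟩
  obtain ⟨p1, p2⟩ := p
  simp only [pvNbrs, List.mem_cons, List.not_mem_nil, or_false] at h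
  rcases h with h | h | h | h <;> subst h <;> simp

-- ---------- vget / vset lemmas ----------

theorem shape_vset (rn cn : Nat) (v : List (List Bool)) (i j : Int)
    (hs : ShapeB rn cn v) : ShapeB rn cn (vset v i j) := by
  obtain ⟨h1, h2⟩ := hs
  by_cases hi : i.toNat < v.length
  · refine ⟨by simpa [vset] using h1, ?_⟩
    intro row hrow
    rcases List.mem_or_eq_of_mem_set hrow with h | h
    · exact h2 _ h
    · subst h
      rw [List.getD_eq_getElem v [] hi, List.length_set]
      exact h2 _ (List.getElem_mem hi)
  · unfold vset
    rw [List.set_eq_of_length_le (by omega)]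
    exact ⟨h1, h2⟩

theorem vget_vset (rn cn : Nat) (v : List (List Bool)) (hs : ShapeB rn cn v)
    {p q : Int × Int} (hp : inbb rn cn p = true) (hq : inbb rn cn q = true) :
    vget (vset v p.1 p.2) q.1 q.2 = if q = p then true else vget v q.1 q.2 := by
  obtain ⟨h1, h2⟩ := hs
  simp only [inbb, decide_eq_true_eq] at hp hq
  have hi : p.1.toNat < v.length := by omega
  have hrow : v.getD p.1.toNat [] = v[p.1.toNat] := List.getD_eq_getElem v [] hi
  have hlen : v[p.1.toNat].length = cn := h2 _ (List.getElem_mem hi)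
  unfold vget vset
  by_cases hfst : q.1.toNat = p.1.toNat
  · rw [List.getD_eq_getElem?_getD (l := v.set _ _), hfst, List.getElem?_set_self hi,
      Option.getD_some]
    by_cases hsnd : q.2.toNat = p.2.toNat
    · have hqp : q = p := by
        have e1 : q.1 = p.1 := by omega
        have e2 : q.2 = p.2 := by omega
        exact Prod.ext e1 e2
      rw [if_pos hqp, hrow, hsnd, List.getD_eq_getElem?_getD,
        List.getElem?_set_self (by omega), Option.getD_some]
    · have hqp : q ≠ p := fun h => hsnd (by rw [h])
      rw [if_neg hqp, List.getD_eq_getElem?_getD, List.getElem?_set_ne (fun h => hsnd h.symm),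
        hrow, List.getD_eq_getElem?_getD (l := v[p.1.toNat])]
  · have hqp : q ≠ p := fun h => hfst (by rw [h])
    rw [if_neg hqp, List.getD_eq_getElem?_getD (l := v.set _ _),
      List.getElem?_set_ne (fun h => hfst h.symm), ← List.getD_eq_getElem?_getD]

theorem vget_vset_self (rn cn : Nat) (v : List (List Bool)) {p : Int × Int}
    (hs : ShapeB rn cn v) (hp : inbb rn cn p = true) :
    vget (vset v p.1 p.2) p.1 p.2 = true := by
  rw [vget_vset rn cn v hs hp hp, if_pos rfl]

theorem vget_vset_ne (rn cn : Nat) (v : List (List Bool)) {p q : Int × Int}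
    (hs : ShapeB rn cn v) (hp : inbb rn cn p = true) (hq : inbb rn cn q = true)
    (hne : p ≠ q) : vget (vset v p.1 p.2) q.1 q.2 = vget v q.1 q.2 := by
  rw [vget_vset rn cn v hs hp hq, if_neg (fun h => hne h.symm)]

theorem vget_vset_mono (rn cn : Nat) (v : List (List Bool)) {p q : Int × Int}
    (hs : ShapeB rn cn v) (hp : inbb rn cn p = true) (hq : inbb rn cn q = true)
    (h : vget v q.1 q.2 = true) : vget (vset v p.1 p.2) q.1 q.2 = true := by
  by_cases hpq : p = q
  · subst hpq; exact vget_vset_self rn cn v hs hp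
  · rw [vget_vset_ne rn cn v hs hp hq hpq]; exact h

theorem count_set_true : ∀ (row : List Bool) (j : Nat), j < row.length →
    row.getD j false = false →
    (row.set j true).count false + 1 = row.count false := by
  intro row
  induction row with
  | nil => intro j h; simp at h
  | cons a t ih =>
    intro j hj hv
    cases j with
    | zero =>
      simp only [List.getD_cons_zero] at hv
      simp [hv]
    | succ j =>
      simp only [List.length_cons] at hj
      simp only [List.getD_cons_succ] at hv
      simp only [List.set_cons_succ, List.count_cons]
      have := ih j (by omega) hv
      omega

theorem unm_set_aux : ∀ (v : List (List Bool)) (n : Nat) (r : List Bool), n < v.length →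
    unm (v.set n r) + ((v.getD n []).count false) = unm v + r.count false := by
  intro v
  induction v with
  | nil => intro n r h; simp at h
  | cons a t ih =>
    intro n r hn
    cases n with
    | zero => simp [unm]; omega
    | succ n =>
      simp only [List.length_cons] at hn
      simp only [List.set_cons_succ, List.getD_cons_succ]
      have := ih n r (by omega)
      simp only [unm, List.map_cons, List.sum_cons] at *
      omega

theorem unm_vset (rn cn : Nat) (v : List (List Bool)) {p : Int × Int}
    (hs : ShapeB rn cn v) (hp : inbb rn cn p = true)
    (hf : vget v p.1 p.2 = false) : unm (vset v p.1 p.2) + 1 = unm v := by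
  obtain ⟨h1, h2⟩ := hs
  simp only [inbb, decide_eq_true_eq] at hp
  have hi : p.1.toNat < v.length := by omega
  have hrow : v.getD p.1.toNat [] = v[p.1.toNat] := List.getD_eq_getElem v [] hi
  have hlen : v[p.1.toNat].length = cn := h2 _ (List.getElem_mem hi)
  have hj : p.2.toNat < (v.getD p.1.toNat []).length := by rw [hrow]; omega
  have hcell : (v.getD p.1.toNat []).getD p.2.toNat false = false := by
    unfold vget at hf; exact hf
  have hcount := count_set_true _ _ hj hcell
  have hmain := unm_set_aux v p.1.toNat ((v.getD p.1.toNat []).set p.2.toNat true) hi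
  unfold vset
  omega

theorem unm_le_aux (cn : Nat) : ∀ (v : List (List Bool)), (∀ row ∈ v, row.length = cn) →
    unm v ≤ v.length * cn := by
  intro v
  induction v with
  | nil => simp [unm]
  | cons a t ih =>
    intro h
    have h1 : a.length = cn := h a (by simp)
    have h2 := ih (fun row hr => h row (by simp [hr]))
    have h3 : a.count false ≤ a.length := List.count_le_length
    simp only [unm, List.map_cons, List.sum_cons, List.length_cons] at *
    calc a.count false + (t.map (fun row => row.count false)).sum
        ≤ cn + t.length * cn := by omega
      _ = (t.length + 1) * cn := by ring

theorem unm_le (rn cn : Nat) (v : List (List Bool)) (hs : ShapeB rn cn v) :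
    unm v ≤ rn * cn := by
  obtain ⟨h1, h2⟩ := hs
  have := unm_le_aux cn v h2
  rwa [h1] at this

theorem shape_replicate_false (rn cn : Nat) :
    ShapeB rn cn (List.replicate rn (List.replicate cn false)) := by
  constructor
  · simp
  · intro row hrow
    rw [List.eq_of_mem_replicate hrow]
    simp

-- ---------- length bound for nodup lists of in-bounds cells ----------

theorem nodup_inb_length_le (rn cn : Nat) (s : List (Int × Int))
    (hnd : s.Nodup) (hin : ∀ p ∈ s, inbb rn cn p = true) : s.length ≤ rn * cn := by
  classical
  have hsub : s.toFinset ⊆ (Finset.range rn ×ˢ Finset.range cn).image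
      (fun x : Nat × Nat => ((x.1 : Int), (x.2 : Int))) := by
    intro p hp
    rw [List.mem_toFinset] at hp
    have := hin p hp
    simp only [inbb, decide_eq_true_eq] at this
    refine Finset.mem_image.mpr ⟨(p.1.toNat, p.2.toNat), ?_, ?_⟩
    · rw [Finset.mem_product]
      constructor <;> rw [Finset.mem_range] <;> omega
    · exact Prod.ext (by omega) (by omega)
  have hcard : ((Finset.range rn ×ˢ Finset.range cn).image
      (fun x : Nat × Nat => ((x.1 : Int), (x.2 : Int)))).card = rn * cn := by
    rw [Finset.card_image_of_injective _ ?_, Finset.card_product, Finset.card_range,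
      Finset.card_range]
    intro a b h
    simp only [Prod.mk.injEq] at h
    exact Prod.ext (by exact_mod_cast h.1) (by exact_mod_cast h.2)
  calc s.length = s.toFinset.card := (List.toFinset_card_of_nodup hnd).symm
    _ ≤ _ := Finset.card_le_card hsub
    _ = rn * cn := hcard

theorem nodup_mem_iff_length_eq (s t : List (Int × Int))
    (hs : s.Nodup) (ht : t.Nodup) (h : ∀ p, p ∈ s ↔ p ∈ t) : s.length = t.length := by
  exact ((List.perm_ext_iff_of_nodup hs ht).mpr h).length_eq

-- ---------- the dirs foldl (one BFS iteration) ----------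

def freshOf (g : List (List Int)) (bg : Int) (rn cn : Nat) (v : List (List Bool))
    (c : Int × Int) : List (Int × Int) :=
  (pvNbrs c).filter (fun n => okb g bg rn cn n && !(vget v n.1 n.2))

theorem nbrs_nodup (c : Int × Int) : (pvNbrs c).Nodup := by
  obtain ⟨c1, c2⟩ := c
  simp [pvNbrs, Prod.ext_iff]
  omega

def freshL (g : List (List Int)) (bg : Int) (rn cn : Nat) (v : List (List Bool))
    (c : Int × Int) (ds : List (Int × Int)) : List (Int × Int) :=
  (ds.map (fun d => (c.1 + d.1, c.2 + d.2))).filter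
    (fun n => okb g bg rn cn n && !(vget v n.1 n.2))

theorem map_dirs (c : Int × Int) :
    pvDirs.map (fun d => (c.1 + d.1, c.2 + d.2)) = pvNbrs c := by
  simp only [pvDirs, pvNbrs, List.map_cons, List.map_nil, Prod.mk.injEq, List.cons.injEq]
  norm_num
  exact ⟨by ring, by ring⟩

theorem freshL_dirs (g : List (List Int)) (bg : Int) (rn cn : Nat) (v : List (List Bool))
    (c : Int × Int) : freshL g bg rn cn v c pvDirs = freshOf g bg rn cn v c := by
  unfold freshL freshOf
  rw [map_dirs]

theorem step_cond_iff (g : List (List Int)) (bg : Int) (rn cn : Nat)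
    (v : List (List Bool)) (n : Int × Int) :
    (0 ≤ n.1 ∧ n.1 < ((rn : Nat) : Int) ∧ 0 ≤ n.2 ∧ n.2 < ((cn : Nat) : Int) ∧
      vget v n.1 n.2 = false ∧ gget g n.1 n.2 ≠ bg) ↔
    (okb g bg rn cn n = true ∧ vget v n.1 n.2 = false) := by
  simp only [okb, Bool.and_eq_true, decide_eq_true_eq, bne_iff_ne]
  tauto

theorem step_fold_aux (g : List (List Int)) (bg : Int) (rn cn : Nat) (c : Int × Int) :
    ∀ (ds : List (Int × Int)) (v : List (List Bool)) (q : List (Int × Int)),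
    ShapeB rn cn v →
    (ds.map (fun d => (c.1 + d.1, c.2 + d.2))).Nodup →
    (let st := ds.foldl (pvStep g bg (rn : Int) (cn : Int) c) (v, q)
     ShapeB rn cn st.1 ∧
     st.2 = q ++ freshL g bg rn cn v c ds ∧
     (∀ p : Int × Int, inbb rn cn p = true →
       (vget st.1 p.1 p.2 = true ↔ vget v p.1 p.2 = true ∨ p ∈ freshL g bg rn cn v c ds)) ∧
     unm st.1 + (freshL g bg rn cn v c ds).length = unm v) := by
  intro ds
  induction ds with
  | nil =>
    intro v q hs _
    refine ⟨hs, by simp [freshL], fun p _ => by simp [freshL], by simp [freshL]⟩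
  | cons d t ih =>
    intro v q hs hnd
    simp only [List.map_cons, List.nodup_cons] at hnd
    obtain ⟨hdn, hndt⟩ := hnd
    set n : Int × Int := (c.1 + d.1, c.2 + d.2) with hn
    simp only [List.foldl_cons]
    by_cases hC : okb g bg rn cn n = true ∧ vget v n.1 n.2 = false
    · have hstep : pvStep g bg (rn : Int) (cn : Int) c (v, q) d
          = (vset v n.1 n.2, q ++ [n]) := by
        unfold pvStep
        rw [if_pos ((step_cond_iff g bg rn cn v n).mpr hC)]
      rw [hstep]
      have hinbn : inbb rn cn n = true := inbb_of_okb g bg rn cn hC.1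
      have hs' : ShapeB rn cn (vset v n.1 n.2) := shape_vset rn cn v n.1 n.2 hs
      have hcongr : freshL g bg rn cn (vset v n.1 n.2) c t = freshL g bg rn cn v c t := by
        unfold freshL
        apply List.filter_congr
        intro m hm
        by_cases hok : okb g bg rn cn m = true
        · have hinm : inbb rn cn m = true := inbb_of_okb g bg rn cn hok
          have hmn : n ≠ m := fun h => hdn (h ▸ hm)
          rw [vget_vset_ne rn cn v hs hinbn hinm hmn]
        · simp only [Bool.not_eq_true] at hok
          simp [hok]
      have hfresh : freshL g bg rn cn v c (d :: t) = n :: freshL g bg rn cn v c t := by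
        unfold freshL
        simp only [List.map_cons, List.filter_cons]
        rw [if_pos (by simp only [Bool.and_eq_true, Bool.not_eq_true']; exact hC)]
      obtain ⟨ih1, ih2, ih3, ih4⟩ := ih (vset v n.1 n.2) (q ++ [n]) hs' hndt
      rw [hcongr] at ih2 ih3 ih4
      refine ⟨ih1, ?_, ?_, ?_⟩
      · rw [ih2, hfresh]
        simp
      · intro p hpin
        rw [ih3 p hpin, hfresh]
        rw [vget_vset rn cn v hs hinbn hpin]
        by_cases hpn : p = n
        · simp [hpn]
        · simp only [if_neg hpn, List.mem_cons]
          tauto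
      · have hunm : unm (vset v n.1 n.2) + 1 = unm v :=
          unm_vset rn cn v hs hinbn hC.2
        rw [hfresh]
        simp only [List.length_cons]
        omega
    · have hstep : pvStep g bg (rn : Int) (cn : Int) c (v, q) d = (v, q) := by
        unfold pvStep
        rw [if_neg (fun h => hC ((step_cond_iff g bg rn cn v n).mp h))]
      rw [hstep]
      have hfresh : freshL g bg rn cn v c (d :: t) = freshL g bg rn cn v c t := by
        unfold freshL
        simp only [List.map_cons, List.filter_cons]
        rw [if_neg (by simp only [Bool.and_eq_true, Bool.not_eq_true']; tauto)]
      rw [hfresh]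
      exact ih v q hs hndt

theorem foldl_step_spec (g : List (List Int)) (bg : Int) (rn cn : Nat)
    (c : Int × Int) (v : List (List Bool)) (q : List (Int × Int))
    (hs : ShapeB rn cn v) :
    let st := pvDirs.foldl (pvStep g bg (rn : Int) (cn : Int) c) (v, q)
    ShapeB rn cn st.1 ∧
    st.2 = q ++ freshOf g bg rn cn v c ∧
    (∀ p : Int × Int, inbb rn cn p = true →
      (vget st.1 p.1 p.2 = true ↔ vget v p.1 p.2 = true ∨ p ∈ freshOf g bg rn cn v c)) ∧
    unm st.1 + (freshOf g bg rn cn v c).length = unm v := by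
  have h := step_fold_aux g bg rn cn c pvDirs v q hs (by rw [map_dirs]; exact nbrs_nodup c)
  rwa [freshL_dirs] at h

-- ---------- BFS main lemma ----------

theorem bfs_terminal (g : List (List Int)) (bg : Int) (rn cn : Nat) (s0 : Int × Int)
    (V0 : Int × Int → Prop) (cells : List (Int × Int)) (v : List (List Bool))
    (hs : ShapeB rn cn v)
    (hc : ∀ p ∈ cells, okb g bg rn cn p = true ∧ Reach g bg rn cn s0 p ∧ vget v p.1 p.2 = true)
    (hnd : cells.Nodup)
    (hM : ∀ p : Int × Int, okb g bg rn cn p = true → vget v p.1 p.2 = true →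
      V0 p ∨ p ∈ cells)
    (hF : ∀ p ∈ cells, ∀ n : Int × Int, adjp g bg rn cn p n → vget v n.1 n.2 = true)
    (hV0 : ∀ p : Int × Int, V0 p → ¬ Reach g bg rn cn s0 p)
    (hV0M : ∀ p : Int × Int, okb g bg rn cn p = true → V0 p → vget v p.1 p.2 = true)
    (hs0 : s0 ∈ cells) :
    ShapeB rn cn v ∧ cells.Nodup ∧
    (∀ p : Int × Int, p ∈ cells ↔ (okb g bg rn cn p = true ∧ Reach g bg rn cn s0 p)) ∧
    (∀ p : Int × Int, okb g bg rn cn p = true →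
      (vget v p.1 p.2 = true ↔ (V0 p ∨ p ∈ cells))) := by
  have hcomplete : ∀ p : Int × Int, Reach g bg rn cn s0 p → p ∈ cells := by
    intro p hreach
    induction hreach with
    | refl => exact hs0
    | tail hr hadj ihh =>
      rename_i b c_
      have hb : b ∈ cells := ihh
      have hvc : vget v c_.1 c_.2 = true := hF b hb c_ hadj
      rcases hM c_ hadj.2.1 hvc with h | h
      · exact absurd (hr.tail hadj) (hV0 c_ h)
      · exact h
  refine ⟨hs, hnd, ?_, ?_⟩
  · intro p
    constructor
    · intro hp
      exact ⟨(hc p hp).1, (hc p hp).2.1⟩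
    · intro ⟨_, hr⟩
      exact hcomplete p hr
  · intro p hok
    constructor
    · intro hv
      exact hM p hok hv
    · intro h
      rcases h with h | h
      · exact hV0M p hok h
      · exact (hc p h).2.2

theorem bfs_go_spec (g : List (List Int)) (bg : Int) (rn cn : Nat) (s0 : Int × Int)
    (V0 : Int × Int → Prop) :
    ∀ (fuel : Nat) (q cells : List (Int × Int)) (v : List (List Bool)),
    ShapeB rn cn v →
    q.length + 2 * unm v ≤ fuel →
    (∀ p ∈ q, okb g bg rn cn p = true ∧ Reach g bg rn cn s0 p ∧ vget v p.1 p.2 = true) →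
    (∀ p ∈ cells, okb g bg rn cn p = true ∧ Reach g bg rn cn s0 p ∧ vget v p.1 p.2 = true) →
    (cells ++ q).Nodup →
    (∀ p : Int × Int, okb g bg rn cn p = true → vget v p.1 p.2 = true →
      V0 p ∨ p ∈ cells ∨ p ∈ q) →
    (∀ p ∈ cells, ∀ n : Int × Int, adjp g bg rn cn p n → vget v n.1 n.2 = true) →
    (∀ p : Int × Int, V0 p → ¬ Reach g bg rn cn s0 p) →
    (∀ p : Int × Int, okb g bg rn cn p = true → V0 p → vget v p.1 p.2 = true) →
    (s0 ∈ cells ∨ s0 ∈ q) →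
    (let r := pvBfsGo g bg (rn : Int) (cn : Int) fuel q v cells
     ShapeB rn cn r.2 ∧ r.1.Nodup ∧
     (∀ p : Int × Int, p ∈ r.1 ↔ (okb g bg rn cn p = true ∧ Reach g bg rn cn s0 p)) ∧
     (∀ p : Int × Int, okb g bg rn cn p = true →
       (vget r.2 p.1 p.2 = true ↔ (V0 p ∨ p ∈ r.1)))) := by
  intro fuel
  induction fuel with
  | zero =>
    intro q cells v hs hfuel hq hc hnd hM hF hV0 hV0M hs0
    have hqnil : q = [] := by
      have := List.length_eq_zero_iff.mp (by omega : q.length = 0)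
      exact this
    subst hqnil
    simp only [List.append_nil] at hnd
    exact bfs_terminal g bg rn cn s0 V0 cells v hs hc hnd
      (fun p hok hv => by rcases hM p hok hv with h | h | h
                          · exact Or.inl h
                          · exact Or.inr h
                          · simp at h)
      hF hV0 hV0M (by rcases hs0 with h | h; exact h; simp at h)
  | succ f ih =>
    intro q cells v hs hfuel hq hc hnd hM hF hV0 hV0M hs0
    match q with
    | [] =>
      simp only [List.append_nil] at hnd
      exact bfs_terminal g bg rn cn s0 V0 cells v hs hc hnd
        (fun p hok hv => by rcases hM p hok hv with h | h | h
                            · exact Or.inl h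
                            · exact Or.inr h
                            · simp at h)
        hF hV0 hV0M (by rcases hs0 with h | h; exact h; simp at h)
    | c :: q' =>
      obtain ⟨hsh1, hst2, hiff, hunm⟩ :=
        foldl_step_spec g bg rn cn c v q' hs
      set st := pvDirs.foldl (pvStep g bg (rn : Int) (cn : Int) c) (v, q') with hstdef
      set F := freshOf g bg rn cn v c with hFdef
      have hFmem : ∀ n ∈ F, n ∈ pvNbrs c ∧ okb g bg rn cn n = true ∧
          vget v n.1 n.2 = false := by
        intro n hn
        rw [hFdef] at hn
        unfold freshOf at hn
        rw [List.mem_filter] at hn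
        refine ⟨hn.1, ?_, ?_⟩
        · have := hn.2
          simp only [Bool.and_eq_true] at this
          exact this.1
        · have := hn.2
          simp only [Bool.and_eq_true, Bool.not_eq_true'] at this
          exact this.2
      have hFnd : F.Nodup := by
        rw [hFdef]
        unfold freshOf
        exact (nbrs_nodup c).filter _
      have hqc := hq c (by simp)
      have hlift : ∀ p : Int × Int, okb g bg rn cn p = true → vget v p.1 p.2 = true →
          vget st.1 p.1 p.2 = true := by
        intro p hok hv
        exact (hiff p (inbb_of_okb g bg rn cn hok)).mpr (Or.inl hv)
      have hFok : ∀ n ∈ F, okb g bg rn cn n = true := fun n hn => (hFmem n hn).2.1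
      have hFadj : ∀ n ∈ F, adjp g bg rn cn c n := by
        intro n hn
        exact nbrs_adjp g bg rn cn hqc.1 (hFok n hn) (hFmem n hn).1
      have hFreach : ∀ n ∈ F, Reach g bg rn cn s0 n := by
        intro n hn
        exact hqc.2.1.tail (hFadj n hn)
      have hFmarked : ∀ n ∈ F, vget st.1 n.1 n.2 = true := by
        intro n hn
        exact (hiff n (inbb_of_okb g bg rn cn (hFok n hn))).mpr (Or.inr hn)
      have hFfresh : ∀ p : Int × Int, vget v p.1 p.2 = true → p ∉ F := by
        intro p hv hpF
        rw [(hFmem p hpF).2.2] at hv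
        exact Bool.false_ne_true hv
      have hstep : pvBfsGo g bg (rn : Int) (cn : Int) (f + 1) (c :: q') v cells
          = pvBfsGo g bg (rn : Int) (cn : Int) f st.2 st.1 (cells ++ [c]) := by
        conv_lhs => rw [pvBfsGo]
      rw [hstep, hst2]
      apply ih (q' ++ F) (cells ++ [c]) st.1 hsh1
      · rw [List.length_append]
        simp only [List.length_cons] at hfuel
        omega
      · intro p hp
        rcases List.mem_append.mp hp with hp | hp
        · have h := hq p (by simp [hp])
          exact ⟨h.1, h.2.1, hlift p h.1 h.2.2⟩
        · exact ⟨hFok p hp, hFreach p hp, hFmarked p hp⟩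
      · intro p hp
        rcases List.mem_append.mp hp with hp | hp
        · have h := hc p hp
          exact ⟨h.1, h.2.1, hlift p h.1 h.2.2⟩
        · have hpc : p = c := by simpa using hp
          subst hpc
          exact ⟨hqc.1, hqc.2.1, hlift p hqc.1 hqc.2.2⟩
      · -- Nodup of (cells ++ [c]) ++ (q' ++ F)
        have hmarkold : ∀ p : Int × Int, p ∈ cells ++ c :: q' → vget v p.1 p.2 = true := by
          intro p hp
          rcases List.mem_append.mp hp with hp | hp
          · exact (hc p hp).2.2
          · rcases List.mem_cons.mp hp with hp | hp
            · subst hp; exact hqc.2.2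
            · exact (hq p (by simp [hp])).2.2
        have hdisjF : ∀ p : Int × Int, p ∈ cells ++ c :: q' → p ∉ F := by
          intro p hp
          exact hFfresh p (hmarkold p hp)
        have hperm : ((cells ++ [c]) ++ (q' ++ F)).Perm ((cells ++ c :: q') ++ F) := by
          simp only [List.append_assoc, List.singleton_append]
          exact List.Perm.refl _
        apply hperm.nodup_iff.mpr
        rw [List.nodup_append]
        exact ⟨hnd, hFnd, fun p hp b hb hpb => hdisjF p hp (hpb ▸ hb)⟩
      · intro p hok hv
        rcases (hiff p (inbb_of_okb g bg rn cn hok)).mp hv with hv' | hv'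
        · rcases hM p hok hv' with h | h | h
          · exact Or.inl h
          · exact Or.inr (Or.inl (by simp [h]))
          · rcases List.mem_cons.mp h with h | h
            · exact Or.inr (Or.inl (by simp [h]))
            · exact Or.inr (Or.inr (by simp [h]))
        · exact Or.inr (Or.inr (by simp [hv']))
      · intro p hp n hadj
        rcases List.mem_append.mp hp with hp | hp
        · exact hlift n hadj.2.1 (hF p hp n hadj)
        · have hpc : p = c := by simpa using hp
          subst hpc
          by_cases hvn : vget v n.1 n.2 = true
          · exact hlift n hadj.2.1 hvn
          · have hnF : n ∈ F := by
              rw [hFdef]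
              unfold freshOf
              rw [List.mem_filter]
              refine ⟨adjp_mem_nbrs g bg rn cn hadj, ?_⟩
              simp only [Bool.and_eq_true, Bool.not_eq_true']
              exact ⟨hadj.2.1, by simpa using hvn⟩
            exact hFmarked n hnF
      · exact hV0
      · intro p hok hV
        exact hlift p hok (hV0M p hok hV)
      · rcases hs0 with h | h
        · exact Or.inl (by simp [h])
        · rcases List.mem_cons.mp h with h | h
          · exact Or.inl (by simp [h])
          · exact Or.inr (by simp [h])

-- ---------- outer scan ----------

theorem nested_foldl_eq (f : (List (List Bool) × List (List (Int × Int))) → Nat → Nat →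
      (List (List Bool) × List (List (Int × Int)))) (rn cn : Nat)
    (st0 : List (List Bool) × List (List (Int × Int))) :
    (List.range rn).foldl (fun st i => (List.range cn).foldl (fun st j => f st i j) st) st0 =
    ((List.range rn).flatMap (fun i => (List.range cn).map (fun j => (i, j)))).foldl
      (fun st p => f st p.1 p.2) st0 := by
  induction (List.range rn) generalizing st0 with
  | nil => simp
  | cons i t ih =>
    simp only [List.foldl_cons, List.flatMap_cons, List.foldl_append, List.foldl_map]
    exact ih _

def GoodComps (g : List (List Int)) (bg : Int) (rn cn : Nat)
    (comps : List (List (Int × Int))) : Prop :=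
  ∀ c ∈ comps, c.Nodup ∧ ∃ s : Int × Int, okb g bg rn cn s = true ∧
    (∀ p : Int × Int, p ∈ c ↔ (okb g bg rn cn p = true ∧ Reach g bg rn cn s p))

theorem scan_spec (g : List (List Int)) (bg : Int) (rn cn : Nat) :
    ∀ (pairs : List (Nat × Nat)) (st : List (List Bool) × List (List (Int × Int))),
    (∀ pr ∈ pairs, pr.1 < rn ∧ pr.2 < cn) →
    ShapeB rn cn st.1 →
    GoodComps g bg rn cn st.2 →
    (∀ p : Int × Int, okb g bg rn cn p = true →
      (vget st.1 p.1 p.2 = true ↔ ∃ c ∈ st.2, p ∈ c)) →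
    (let st' := pairs.foldl (fun st pr =>
        if vget st.1 (pr.1 : Int) (pr.2 : Int) = false ∧ gget g (pr.1 : Int) (pr.2 : Int) ≠ bg then
          let r := pvBfs g bg (rn : Int) (cn : Int) rn cn (pr.1 : Int) (pr.2 : Int) st.1
          (r.2, st.2 ++ [r.1])
        else st) st
     ShapeB rn cn st'.1 ∧ GoodComps g bg rn cn st'.2 ∧
     (∀ p : Int × Int, okb g bg rn cn p = true →
       (vget st'.1 p.1 p.2 = true ↔ ∃ c ∈ st'.2, p ∈ c)) ∧
     (∀ c ∈ st.2, c ∈ st'.2) ∧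
     (∀ pr ∈ pairs, okb g bg rn cn ((pr.1 : Int), (pr.2 : Int)) = true →
       vget st'.1 (pr.1 : Int) (pr.2 : Int) = true)) := by
  intro pairs
  induction pairs with
  | nil =>
    intro st _ hsh hgood hMiff
    exact ⟨hsh, hgood, hMiff, fun c hc => hc, by simp⟩
  | cons pr rest ih =>
    intro st hpairs hsh hgood hMiff
    have hbnd := hpairs pr (by simp)
    set s0 : Int × Int := ((pr.1 : Int), (pr.2 : Int)) with hs0def
    simp only [List.foldl_cons]
    by_cases hguard : vget st.1 (pr.1 : Int) (pr.2 : Int) = false ∧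
        gget g (pr.1 : Int) (pr.2 : Int) ≠ bg
    · rw [if_pos hguard]
      have hoks0 : okb g bg rn cn s0 = true := by
        simp only [hs0def, okb, Bool.and_eq_true, decide_eq_true_eq, bne_iff_ne]
        exact ⟨⟨by omega, by exact_mod_cast hbnd.1, by omega, by exact_mod_cast hbnd.2⟩,
          hguard.2⟩
      have hins0 : inbb rn cn s0 = true := inbb_of_okb g bg rn cn hoks0
      have hsv : ShapeB rn cn (vset st.1 s0.1 s0.2) := shape_vset rn cn st.1 _ _ hsh
      have hunm1 : unm (vset st.1 s0.1 s0.2) + 1 = unm st.1 :=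
        unm_vset rn cn st.1 hsh hins0 hguard.1
      have hunm2 : unm st.1 ≤ rn * cn := unm_le rn cn st.1 hsh
      have hbfs := bfs_go_spec g bg rn cn s0 (fun p => ∃ c ∈ st.2, p ∈ c)
        (2 * (rn * cn) + 1) [s0] [] (vset st.1 s0.1 s0.2)
        hsv
        (by simp only [List.length_cons, List.length_nil]; omega)
        (by
          intro p hp
          have hps0 : p = s0 := by simpa using hp
          subst hps0
          exact ⟨hoks0, Relation.ReflTransGen.refl,
            vget_vset_self rn cn st.1 hsh hins0⟩)
        (by simp)
        (by simp)
        (by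
          intro p hok hv
          by_cases hps0 : p = s0
          · exact Or.inr (Or.inr (by simp [hps0]))
          · rw [vget_vset_ne rn cn st.1 hsh hins0 (inbb_of_okb g bg rn cn hok)
              (fun h => hps0 h.symm)] at hv
            exact Or.inl ((hMiff p hok).mp hv))
        (by simp)
        (by
          intro p hV hreach
          obtain ⟨c, hcin, hpc⟩ := hV
          obtain ⟨hcnd, s, hoks, hchar⟩ := hgood c hcin
          have hrsp : Reach g bg rn cn s p := ((hchar p).mp hpc).2
          have hrs0 : Reach g bg rn cn s s0 :=
            hrsp.trans (reach_symm g bg rn cn hreach)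
          have hs0c : s0 ∈ c := (hchar s0).mpr ⟨hoks0, hrs0⟩
          have : vget st.1 s0.1 s0.2 = true := (hMiff s0 hoks0).mpr ⟨c, hcin, hs0c⟩
          rw [hguard.1] at this
          exact Bool.false_ne_true this)
        (by
          intro p hok hV
          exact vget_vset_mono rn cn st.1 hsh hins0 (inbb_of_okb g bg rn cn hok)
            ((hMiff p hok).mpr hV))
        (Or.inr (by simp))
      obtain ⟨hbs, hbnd2, hbmem, hbiff⟩ := hbfs
      set r := pvBfsGo g bg (rn : Int) (cn : Int) (2 * (rn * cn) + 1) [s0]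
        (vset st.1 s0.1 s0.2) [] with hrdef
      have hrr : pvBfs g bg (rn : Int) (cn : Int) rn cn (pr.1 : Int) (pr.2 : Int) st.1 = r := by
        rw [hrdef]
        rfl
      have hgood' : GoodComps g bg rn cn (st.2 ++ [r.1]) := by
        intro c hc
        rcases List.mem_append.mp hc with hc | hc
        · exact hgood c hc
        · have : c = r.1 := by simpa using hc
          subst this
          exact ⟨hbnd2, s0, hoks0, hbmem⟩
      have hMiff' : ∀ p : Int × Int, okb g bg rn cn p = true →
          (vget r.2 p.1 p.2 = true ↔ ∃ c ∈ st.2 ++ [r.1], p ∈ c) := by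
        intro p hok
        rw [hbiff p hok]
        constructor
        · intro h
          rcases h with ⟨c, hcin, hpc⟩ | h
          · exact ⟨c, by simp [hcin], hpc⟩
          · exact ⟨r.1, by simp, h⟩
        · intro ⟨c, hcin, hpc⟩
          rcases List.mem_append.mp hcin with hcin | hcin
          · exact Or.inl ⟨c, hcin, hpc⟩
          · have : c = r.1 := by simpa using hcin
            subst this
            exact Or.inr hpc
      have hrest := ih (r.2, st.2 ++ [r.1])
        (fun x hx => hpairs x (by simp [hx])) hbs hgood' hMiff'
      rw [hrr]
      obtain ⟨f1, f2, f3, f4, f5⟩ := hrest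
      refine ⟨f1, f2, f3, ?_, ?_⟩
      · intro c hc
        exact f4 c (by simp [hc])
      · intro x hx hokx
        rcases List.mem_cons.mp hx with hx | hx
        · subst hx
          have hmem0 : s0 ∈ r.1 := (hbmem s0).mpr ⟨hoks0, Relation.ReflTransGen.refl⟩
          have : r.1 ∈ (st.2 ++ [r.1]) := by simp
          exact (f3 s0 hokx).mpr ⟨r.1, f4 r.1 this, hmem0⟩
        · exact f5 x hx hokx
    · rw [if_neg hguard]
      have hrest := ih st (fun x hx => hpairs x (by simp [hx])) hsh hgood hMiff
      obtain ⟨f1, f2, f3, f4, f5⟩ := hrest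
      refine ⟨f1, f2, f3, f4, ?_⟩
      intro x hx hokx
      rcases List.mem_cons.mp hx with hx | hx
      · subst hx
        have hgg : gget g (x.1 : Int) (x.2 : Int) ≠ bg := by
          have := hokx
          simp only [okb, Bool.and_eq_true, bne_iff_ne] at this
          exact this.2
        have hv : vget st.1 (x.1 : Int) (x.2 : Int) = true := by
          by_contra hfalse
          simp only [Bool.not_eq_true] at hfalse
          exact hguard ⟨hfalse, hgg⟩
        have := (hMiff _ hokx).mp hv
        obtain ⟨c, hcin, hpc⟩ := this
        exact (f3 _ hokx).mpr ⟨c, f4 c hcin, hpc⟩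
      · exact f5 x hx hokx

-- ---------- B-side fixpoint ----------

theorem compGo_spec (g : List (List Int)) (bg : Int) (rn cn : Nat) :
    ∀ (fuel : Nat) (s : List (Int × Int)),
    s.Nodup → (∀ p ∈ s, okb g bg rn cn p = true) →
    rn * cn + 1 ≤ fuel + s.length →
    (let r := pvCompGo g bg (rn : Int) (cn : Int) fuel s
     r.Nodup ∧ (∀ p ∈ r, okb g bg rn cn p = true) ∧ (∀ p ∈ s, p ∈ r) ∧
     (∀ p ∈ r, ∃ q ∈ s, Reach g bg rn cn q p) ∧
     (∀ p ∈ r, ∀ n : Int × Int, adjp g bg rn cn p n → n ∈ r)) := by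
  intro fuel
  induction fuel with
  | zero =>
    intro s hnd hok hfuel
    exfalso
    have := nodup_inb_length_le rn cn s hnd
      (fun p hp => inbb_of_okb g bg rn cn (hok p hp))
    omega
  | succ f ih =>
    intro s hnd hok hfuel
    have hcands : ∀ x : Int × Int,
        x ∈ (s.flatMap pvNbrs).filter (fun p =>
          decide (0 ≤ p.1 ∧ p.1 < ((rn : Nat) : Int) ∧ 0 ≤ p.2 ∧ p.2 < ((cn : Nat) : Int)) &&
            (gget g p.1 p.2 != bg)) ↔
        ((∃ p ∈ s, x ∈ pvNbrs p) ∧ okb g bg rn cn x = true) := by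
      intro x
      rw [List.mem_filter, List.mem_flatMap]
      unfold okb
      tauto
    have htmem : ∀ x : Int × Int, x ∈ pvGrow g bg (rn : Int) (cn : Int) s ↔
        x ∈ s ∨ ((∃ p ∈ s, x ∈ pvNbrs p) ∧ okb g bg rn cn x = true) := by
      intro x
      unfold pvGrow
      rw [PySem.Set.mem_union]
      rw [hcands x]
    have htnd : (pvGrow g bg (rn : Int) (cn : Int) s).Nodup :=
      PySem.Set.nodup_union _ _ hnd
    have htok : ∀ x ∈ pvGrow g bg (rn : Int) (cn : Int) s, okb g bg rn cn x = true := by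
      intro x hx
      rcases (htmem x).mp hx with hx | hx
      · exact hok x hx
      · exact hx.2
    have htreach : ∀ x ∈ pvGrow g bg (rn : Int) (cn : Int) s,
        ∃ q ∈ s, Reach g bg rn cn q x := by
      intro x hx
      rcases (htmem x).mp hx with hx | hx
      · exact ⟨x, hx, Relation.ReflTransGen.refl⟩
      · obtain ⟨⟨p, hps, hnbr⟩, hokx⟩ := hx
        exact ⟨p, hps, Relation.ReflTransGen.single
          (nbrs_adjp g bg rn cn (hok p hps) hokx hnbr)⟩
    have hsub : ∀ x ∈ s, x ∈ pvGrow g bg (rn : Int) (cn : Int) s := by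
      intro x hx
      exact (htmem x).mpr (Or.inl hx)
    show (let t := pvGrow g bg (rn : Int) (cn : Int) s
          if PySem.Set.equal t s then s else pvCompGo g bg (rn : Int) (cn : Int) f t).Nodup ∧ _
    by_cases heq : PySem.Set.equal (pvGrow g bg (rn : Int) (cn : Int) s) s = true
    · simp only [pvCompGo, heq, if_true]
      refine ⟨hnd, hok, fun p hp => hp, fun p hp => ⟨p, hp, Relation.ReflTransGen.refl⟩, ?_⟩
      intro p hp n hadj
      have hncand : n ∈ pvGrow g bg (rn : Int) (cn : Int) s :=
        (htmem n).mpr (Or.inr ⟨⟨p, hp, adjp_mem_nbrs g bg rn cn hadj⟩, hadj.2.1⟩)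
      exact (((PySem.Set.equal_iff _ _).mp heq) n).mp hncand
    · have hlt : s.length < (pvGrow g bg (rn : Int) (cn : Int) s).length := by
        have hne : ∃ x ∈ pvGrow g bg (rn : Int) (cn : Int) s, x ∉ s := by
          by_contra hall
          push_neg at hall
          apply heq
          rw [PySem.Set.equal_iff _ _]
          intro x
          exact ⟨fun hx => hall x hx, fun hx => hsub x hx⟩
        obtain ⟨x, hxt, hxs⟩ := hne
        have h1 : s.toFinset ⊂ (pvGrow g bg (rn : Int) (cn : Int) s).toFinset := by
          constructor
          · intro y hy
            rw [List.mem_toFinset] at *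
            exact hsub y hy
          · intro hcon
            exact hxs (List.mem_toFinset.mp (hcon (List.mem_toFinset.mpr hxt)))
        have := Finset.card_lt_card h1
        rwa [List.toFinset_card_of_nodup hnd, List.toFinset_card_of_nodup htnd] at this
      have hrec := ih (pvGrow g bg (rn : Int) (cn : Int) s) htnd htok (by omega)
      simp only [pvCompGo, heq]
      obtain ⟨r1, r2, r3, r4, r5⟩ := hrec
      refine ⟨r1, r2, fun p hp => r3 p (hsub p hp), ?_, r5⟩
      intro p hp
      obtain ⟨q, hqt, hreach⟩ := r4 p hp
      obtain ⟨q0, hq0, hreach0⟩ := htreach q hqt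
      exact ⟨q0, hq0, hreach0.trans hreach⟩

theorem comp_alt_spec (g : List (List Int)) (bg : Int) (rn cn : Nat) (p0 : Int × Int)
    (hok : okb g bg rn cn p0 = true) :
    let r := pvCompGo g bg (rn : Int) (cn : Int) (rn * cn) [p0]
    r.Nodup ∧ (∀ p : Int × Int, p ∈ r ↔ (okb g bg rn cn p = true ∧ Reach g bg rn cn p0 p)) := by
  obtain ⟨r1, r2, r3, r4, r5⟩ := compGo_spec g bg rn cn (rn * cn) [p0]
    (by simp) (by intro p hp; rw [List.mem_singleton] at hp; subst hp; exact hok)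
    (by simp)
  refine ⟨r1, ?_⟩
  intro p
  constructor
  · intro hp
    obtain ⟨q, hq, hreach⟩ := r4 p hp
    rw [List.mem_singleton] at hq
    subst hq
    exact ⟨r2 p hp, hreach⟩
  · intro ⟨hokp, hreach⟩
    induction hreach with
    | refl => exact r3 p0 (by simp)
    | tail hr hadj ihh =>
      exact r5 _ (ihh hadj.1) _ hadj

-- ---------- result building ----------

theorem shape_rset (rn cn : Nat) (r : List (List Int)) (i j : Int) (c : Int)
    (hs : ShapeI rn cn r) : ShapeI rn cn (rset r i j c) := by
  obtain ⟨h1, h2⟩ := hs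
  by_cases hi : i.toNat < r.length
  · refine ⟨by simpa [rset] using h1, ?_⟩
    intro row hrow
    rcases List.mem_or_eq_of_mem_set hrow with h | h
    · exact h2 _ h
    · subst h
      rw [List.getD_eq_getElem r [] hi, List.length_set]
      exact h2 _ (List.getElem_mem hi)
  · unfold rset
    rw [List.set_eq_of_length_le (by omega)]
    exact ⟨h1, h2⟩

theorem rget_rset (rn cn : Nat) (r : List (List Int)) (c : Int) (hs : ShapeI rn cn r)
    {p q : Int × Int} (hp : inbb rn cn p = true) (hq : inbb rn cn q = true) :
    rget (rset r p.1 p.2 c) q.1 q.2 = if q = p then c else rget r q.1 q.2 := by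
  obtain ⟨h1, h2⟩ := hs
  simp only [inbb, decide_eq_true_eq] at hp hq
  have hi : p.1.toNat < r.length := by omega
  have hrow : r.getD p.1.toNat [] = r[p.1.toNat] := List.getD_eq_getElem r [] hi
  have hlen : r[p.1.toNat].length = cn := h2 _ (List.getElem_mem hi)
  unfold rget rset
  by_cases hfst : q.1.toNat = p.1.toNat
  · rw [List.getD_eq_getElem?_getD (l := r.set _ _), hfst, List.getElem?_set_self hi,
      Option.getD_some]
    by_cases hsnd : q.2.toNat = p.2.toNat
    · have hqp : q = p := by
        have e1 : q.1 = p.1 := by omega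
        have e2 : q.2 = p.2 := by omega
        exact Prod.ext e1 e2
      rw [if_pos hqp, hrow, hsnd, List.getD_eq_getElem?_getD,
        List.getElem?_set_self (by omega), Option.getD_some]
    · have hqp : q ≠ p := fun h => hsnd (by rw [h])
      rw [if_neg hqp, List.getD_eq_getElem?_getD, List.getElem?_set_ne (fun h => hsnd h.symm),
        hrow, List.getD_eq_getElem?_getD (l := r[p.1.toNat])]
  · have hqp : q ≠ p := fun h => hfst (by rw [h])
    rw [if_neg hqp, List.getD_eq_getElem?_getD (l := r.set _ _),
      List.getElem?_set_ne (fun h => hfst h.symm), ← List.getD_eq_getElem?_getD]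

theorem rget_rset_self (rn cn : Nat) (r : List (List Int)) {p : Int × Int} (c : Int)
    (hs : ShapeI rn cn r) (hp : inbb rn cn p = true) :
    rget (rset r p.1 p.2 c) p.1 p.2 = c := by
  rw [rget_rset rn cn r c hs hp hp, if_pos rfl]

theorem rget_rset_ne (rn cn : Nat) (r : List (List Int)) {p q : Int × Int} (c : Int)
    (hs : ShapeI rn cn r) (hp : inbb rn cn p = true) (hq : inbb rn cn q = true)
    (hne : p ≠ q) : rget (rset r p.1 p.2 c) q.1 q.2 = rget r q.1 q.2 := by
  rw [rget_rset rn cn r c hs hp hq, if_neg (fun h => hne h.symm)]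

theorem applyOne_shape (rn cn : Nat) (c : List (Int × Int)) (val : Int) :
    ∀ (r : List (List Int)), ShapeI rn cn r →
    ShapeI rn cn (c.foldl (fun res p => rset res p.1 p.2 val) r) := by
  induction c with
  | nil => intro r hs; simpa using hs
  | cons x t ih =>
    intro r hs
    simp only [List.foldl_cons]
    exact ih _ (shape_rset rn cn r x.1 x.2 val hs)

theorem applyOne_get (rn cn : Nat) (c : List (Int × Int)) (val : Int) :
    ∀ (r : List (List Int)) (p : Int × Int), ShapeI rn cn r → inbb rn cn p = true →
    (∀ x ∈ c, inbb rn cn x = true) →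
    rget (c.foldl (fun res x => rset res x.1 x.2 val) r) p.1 p.2 =
      if p ∈ c then val else rget r p.1 p.2 := by
  induction c with
  | nil => intro r p _ _ _; simp
  | cons x t ih =>
    intro r p hs hp hin
    simp only [List.foldl_cons]
    rw [ih _ p (shape_rset rn cn r x.1 x.2 val hs) hp (fun y hy => hin y (by simp [hy]))]
    by_cases hpt : p ∈ t
    · rw [if_pos hpt, if_pos (by simp [hpt])]
    · rw [if_neg hpt]
      by_cases hpx : p = x
      · subst hpx
        rw [if_pos (by simp), rget_rset_self rn cn r val hs hp]
      · rw [if_neg (by simp [hpx, hpt]),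
          rget_rset_ne rn cn r val hs (hin x (by simp)) hp (fun h => hpx h.symm)]

theorem applyAll_get (rn cn : Nat) (a : Int) :
    ∀ (comps : List (List (Int × Int))) (r : List (List Int)) (p : Int × Int),
    ShapeI rn cn r → inbb rn cn p = true →
    (∀ c ∈ comps, ∀ x ∈ c, inbb rn cn x = true) →
    (∀ c ∈ comps, p ∈ c → min (c.length : Int) 9 = a) →
    rget (comps.foldl (fun res comp =>
        comp.foldl (fun res x => rset res x.1 x.2 (min (comp.length : Int) 9)) res) r) p.1 p.2 =
      if ∃ c ∈ comps, p ∈ c then a else rget r p.1 p.2 := by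
  intro comps
  induction comps with
  | nil => intro r p _ _ _ _; simp
  | cons c0 t ih =>
    intro r p hs hp hin hval
    simp only [List.foldl_cons]
    rw [ih _ p (applyOne_shape rn cn c0 _ r hs) hp
      (fun c hc x hx => hin c (by simp [hc]) x hx)
      (fun c hc hpc => hval c (by simp [hc]) hpc)]
    rw [applyOne_get rn cn c0 _ r p hs hp (fun x hx => hin c0 (by simp) x hx)]
    by_cases hex : ∃ c ∈ t, p ∈ c
    · rw [if_pos hex, if_pos ⟨hex.choose, by simp [hex.choose_spec.1], hex.choose_spec.2⟩]
    · rw [if_neg hex]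
      by_cases hpc : p ∈ c0
      · rw [if_pos hpc, if_pos ⟨c0, by simp, hpc⟩]
        exact hval c0 (by simp) hpc
      · rw [if_neg hpc, if_neg (by simp [hpc]; intro c hc hpcc; exact hex ⟨c, hc, hpcc⟩)]

theorem applyAll_shape (rn cn : Nat) (comps : List (List (Int × Int)))
    (r : List (List Int)) (hs : ShapeI rn cn r) :
    ShapeI rn cn (comps.foldl (fun res comp =>
      comp.foldl (fun res x => rset res x.1 x.2 (min (comp.length : Int) 9)) res) r) := by
  induction comps generalizing r with
  | nil => simpa using hs
  | cons c0 t ih =>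
    simp only [List.foldl_cons]
    exact ih _ (applyOne_shape rn cn c0 _ r hs)

-- ---------- final assembly helpers ----------

theorem vget_replicate_false (rn cn : Nat) (i j : Int) :
    vget (List.replicate rn (List.replicate cn false)) i j = false := by
  unfold vget
  by_cases hi : i.toNat < rn
  · rw [List.getD_eq_getElem _ [] (by simpa using hi), List.getElem_replicate]
    by_cases hj : j.toNat < cn
    · rw [List.getD_eq_getElem _ false (by simpa using hj), List.getElem_replicate]
    · rw [List.getD_eq_default]
      simpa using hj
  · have h : (List.replicate rn (List.replicate cn false)).getD i.toNat [] = [] := by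
      rw [List.getD_eq_default]
      simpa using hi
    rw [h]
    simp

theorem rget_replicate (rn cn : Nat) (bg : Int) (i j : Int)
    (hi : i.toNat < rn) (hj : j.toNat < cn) :
    rget (List.replicate rn (List.replicate cn bg)) i j = bg := by
  unfold rget
  rw [List.getD_eq_getElem _ [] (by simpa using hi), List.getElem_replicate,
    List.getD_eq_getElem _ 0 (by simpa using hj), List.getElem_replicate]

theorem shape_replicate_int (rn cn : Nat) (bg : Int) :
    ShapeI rn cn (List.replicate rn (List.replicate cn bg)) := by
  constructor
  · simp
  · intro row hrow
    rw [List.eq_of_mem_replicate hrow]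
    simp

theorem mem_allPairs (rn cn : Nat) (pr : Nat × Nat) :
    pr ∈ (List.range rn).flatMap (fun i => (List.range cn).map (fun j => (i, j))) ↔
    pr.1 < rn ∧ pr.2 < cn := by
  obtain ⟨a, b⟩ := pr
  constructor
  · intro h
    simp only [List.mem_flatMap, List.mem_map, List.mem_range] at h
    obtain ⟨i, hi, j, hj, he⟩ := h
    obtain ⟨h1, h2⟩ := Prod.mk.injEq .. |>.mp he
    subst h1
    subst h2
    exact ⟨hi, hj⟩
  · intro ⟨h1, h2⟩
    simp only [List.mem_flatMap, List.mem_map, List.mem_range]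
    exact ⟨a, h1, b, h2, rfl⟩

theorem rget_eq_getElem (r : List (List Int)) (i j : Nat) :
    ∀ (h1 : i < r.length) (h2 : j < r[i].length),
    rget r (i : Int) (j : Int) = r[i][j] := by
  intro h1 h2
  unfold rget
  rw [Int.toNat_natCast, Int.toNat_natCast, List.getD_eq_getElem _ [] h1,
    List.getD_eq_getElem _ 0 h2]

-- ===== VERDICT (by name: the statement is the Claim_ definition above) =====
theorem paint_objects_by_count_spec : Claim_equal_paint_objects_by_count := by
  intro g hdom hpre
  unfold Spec_paint_objects_by_count
  unfold paint_objects_by_count paint_objects_by_count_alt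
  by_cases hguard : g = [] ∨ g.headD [] = []
  · rw [if_pos hguard, if_pos hguard]
  · rw [if_neg hguard, if_neg hguard]
    simp only []
    set rn := g.length with hrn
    set cn := (g.headD []).length with hcn
    set bg := bgOf g with hbg
    have hST : (List.foldl
          (fun st (i : Nat) =>
            List.foldl
              (fun st (j : Nat) =>
                if vget st.1 ↑i ↑j = false ∧ gget g ↑i ↑j ≠ bg then
                  ((pvBfs g bg (rn : Int) (cn : Int) rn cn (↑i) (↑j) st.1).2,
                    st.2 ++ [(pvBfs g bg (rn : Int) (cn : Int) rn cn (↑i) (↑j) st.1).1])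
                else st)
              st (List.range cn))
          (List.replicate rn (List.replicate cn false), ([] : List (List (Int × Int))))
          (List.range rn))
        = (((List.range rn).flatMap (fun i => (List.range cn).map (fun j => (i, j)))).foldl
            (fun st pr =>
              if vget st.1 (pr.1 : Int) (pr.2 : Int) = false ∧
                  gget g (pr.1 : Int) (pr.2 : Int) ≠ bg then
                let r := pvBfs g bg (rn : Int) (cn : Int) rn cn (pr.1 : Int) (pr.2 : Int) st.1
                (r.2, st.2 ++ [r.1])
              else st)
            (List.replicate rn (List.replicate cn false), [])) := by
      rw [nested_foldl_eq]
    rw [hST]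
    obtain ⟨f1, f2, f3, f4, f5⟩ := scan_spec g bg rn cn
      ((List.range rn).flatMap (fun i => (List.range cn).map (fun j => (i, j))))
      (List.replicate rn (List.replicate cn false), [])
      (fun pr hpr => (mem_allPairs rn cn pr).mp hpr)
      (shape_replicate_false rn cn)
      (fun c hc => absurd hc (by simp))
      (fun p hok => by rw [vget_replicate_false rn cn p.1 p.2]; simp)
    set SC := ((List.range rn).flatMap (fun i => (List.range cn).map (fun j => (i, j)))).foldl
            (fun st pr =>
              if vget st.1 (pr.1 : Int) (pr.2 : Int) = false ∧
                  gget g (pr.1 : Int) (pr.2 : Int) ≠ bg then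
                let r := pvBfs g bg (rn : Int) (cn : Int) rn cn (pr.1 : Int) (pr.2 : Int) st.1
                (r.2, st.2 ++ [r.1])
              else st)
            (List.replicate rn (List.replicate cn false), ([] : List (List (Int × Int))))
      with hSC
    have hcover : ∀ p : Int × Int, okb g bg rn cn p = true → ∃ c ∈ SC.2, p ∈ c := by
      intro p hok
      have hin := inbb_of_okb g bg rn cn hok
      simp only [inbb, decide_eq_true_eq] at hin
      have hpr : (p.1.toNat, p.2.toNat) ∈
          (List.range rn).flatMap (fun i => (List.range cn).map (fun j => (i, j))) :=
        (mem_allPairs rn cn _).mpr ⟨by omega, by omega⟩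
      have hpe : (((p.1.toNat : Nat) : Int), ((p.2.toNat : Nat) : Int)) = p :=
        Prod.ext (Int.toNat_of_nonneg (by omega)) (Int.toNat_of_nonneg (by omega))
      have hmark := f5 (p.1.toNat, p.2.toNat) hpr (by rw [hpe]; exact hok)
      have : vget SC.1 p.1 p.2 = true := by
        have h1 : ((p.1.toNat : Nat) : Int) = p.1 := Int.toNat_of_nonneg (by omega)
        have h2 : ((p.2.toNat : Nat) : Int) = p.2 := Int.toNat_of_nonneg (by omega)
        rwa [h1, h2] at hmark
      exact (f3 p hok).mp this
    have hin_all : ∀ c ∈ SC.2, ∀ x ∈ c, inbb rn cn x = true := by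
      intro c hc x hx
      obtain ⟨_, s, _, hchar⟩ := f2 c hc
      exact inbb_of_okb g bg rn cn ((hchar x).mp hx).1
    have hinit := shape_replicate_int rn cn bg
    have hshapeAll := applyAll_shape rn cn SC.2 (List.replicate rn (List.replicate cn bg)) hinit
    have hpoint : ∀ (i j : Nat), i < rn → j < cn →
        rget (SC.2.foldl (fun res comp =>
          comp.foldl (fun res x => rset res x.1 x.2 (min (comp.length : Int) 9)) res)
          (List.replicate rn (List.replicate cn bg))) (i : Int) (j : Int) =
        if gget g (i : Int) (j : Int) = bg then bg
        else min ((pvCompGo g bg (rn : Int) (cn : Int) (rn * cn) [((i : Int), (j : Int))]).length : Int) 9 := by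
      intro i j hi hj
      have hinb : inbb rn cn ((i : Int), (j : Int)) = true := by
        simp only [inbb, decide_eq_true_eq]
        refine ⟨by omega, by exact_mod_cast hi, by omega, by exact_mod_cast hj⟩
      by_cases hbgc : gget g (i : Int) (j : Int) = bg
      · rw [if_pos hbgc]
        have hnok : ∀ c ∈ SC.2, ((i : Int), (j : Int)) ∉ c := by
          intro c hc hmem
          obtain ⟨_, s, _, hchar⟩ := f2 c hc
          have hok := ((hchar _).mp hmem).1
          simp only [okb, Bool.and_eq_true, bne_iff_ne] at hok
          exact hok.2 hbgc
        rw [applyAll_get rn cn bg SC.2 _ _ hinit hinb hin_all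
          (fun c hc hmem => absurd hmem (hnok c hc))]
        rw [if_neg (by rintro ⟨c, hc, hmem⟩; exact hnok c hc hmem)]
        exact rget_replicate rn cn bg _ _ (by simpa using hi) (by simpa using hj)
      · rw [if_neg hbgc]
        have hok : okb g bg rn cn ((i : Int), (j : Int)) = true := by
          simp only [okb, Bool.and_eq_true, decide_eq_true_eq, bne_iff_ne]
          exact ⟨⟨by omega, by exact_mod_cast hi, by omega, by exact_mod_cast hj⟩, hbgc⟩
        obtain ⟨hBnd, hBchar⟩ := comp_alt_spec g bg rn cn ((i : Int), (j : Int)) hok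
        have hval : ∀ c ∈ SC.2, ((i : Int), (j : Int)) ∈ c →
            min ((c.length : Nat) : Int) 9 =
            min ((pvCompGo g bg (rn : Int) (cn : Int) (rn * cn)
              [((i : Int), (j : Int))]).length : Int) 9 := by
          intro c hc hmem
          obtain ⟨hcnd, s, hoks, hchar⟩ := f2 c hc
          have hsp : Reach g bg rn cn s ((i : Int), (j : Int)) := ((hchar _).mp hmem).2
          have hmemeq : ∀ x, x ∈ c ↔ x ∈ pvCompGo g bg (rn : Int) (cn : Int) (rn * cn)
              [((i : Int), (j : Int))] := by
            intro x
            rw [hchar x, hBchar x]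
            constructor
            · intro ⟨hokx, hr⟩
              exact ⟨hokx, (reach_symm g bg rn cn hsp).trans hr⟩
            · intro ⟨hokx, hr⟩
              exact ⟨hokx, hsp.trans hr⟩
          rw [nodup_mem_iff_length_eq c _ hcnd hBnd hmemeq]
        rw [applyAll_get rn cn
          (min ((pvCompGo g bg (rn : Int) (cn : Int) (rn * cn)
            [((i : Int), (j : Int))]).length : Int) 9)
          SC.2 _ _ hinit hinb hin_all hval]
        rw [if_pos (hcover _ hok)]
    apply List.ext_getElem
    · rw [hshapeAll.1]
      simp
    · intro i h1 h2
      apply List.ext_getElem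
      · rw [hshapeAll.2 _ (List.getElem_mem h1)]
        simp [List.getElem_map]
      · intro j hj1 hj2
        have hi' : i < rn := by
          have := h1
          rw [hshapeAll.1] at this
          exact this
        have hj' : j < cn := by
          have := hj1
          rw [hshapeAll.2 _ (List.getElem_mem h1)] at this
          exact this
        rw [← rget_eq_getElem _ i j h1 hj1]
        rw [hpoint i j hi' hj']
        simp only [List.getElem_map, List.getElem_range]
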